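-- pv_equiv track=rewrite | github.com/Lukasz1928/advent-of-code | solutions/2019/day22/task1/main.py | deal_with_increment
-- ===== SOURCE A (Python) =====
-- def deal_with_increment(cards, inc):
--     l = len(cards)
--     d = [None] * l
--     index = 0
--     for c in cards:
--         d[index] = c
--         index = (index + inc) % l
--     return d
-- ===== SOURCE B (Python) =====
-- def _modinv(a, m):
--     # extended Euclid: returns the inverse of a modulo m (requires gcd(a, m) == 1)
--     old_r, r = a, m
--     old_s, s = 1, 0
--     while r != 0:
--         q = old_r // r
--         old_r, r = r, old_r - q * r
--         old_s, s = s, old_s - q * s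
--     return old_s % m
--
--
-- def deal_with_increment(cards, inc):
--     l = len(cards)
--     if l == 0:
--         return []
--     inv = _modinv(inc % l, l)
--     return [cards[(j * inv) % l] for j in range(l)]
-- ===== Notes on version B (the rewrite author's own statement) =====
-- stated objective: alternative
-- what changed: B gathers instead of scattering: it computes the modular inverse of inc mod l by extended Euclid and builds the output directly as out[j] = cards[(j*inv) % l], with no destination writes and no running index.
-- outside the precondition, e.g. on deal_with_increment([1, 2, 3, 4], 2): A returns [3, None, 4, None], B returns [1, 2, 3, 4]
import Mathlib
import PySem

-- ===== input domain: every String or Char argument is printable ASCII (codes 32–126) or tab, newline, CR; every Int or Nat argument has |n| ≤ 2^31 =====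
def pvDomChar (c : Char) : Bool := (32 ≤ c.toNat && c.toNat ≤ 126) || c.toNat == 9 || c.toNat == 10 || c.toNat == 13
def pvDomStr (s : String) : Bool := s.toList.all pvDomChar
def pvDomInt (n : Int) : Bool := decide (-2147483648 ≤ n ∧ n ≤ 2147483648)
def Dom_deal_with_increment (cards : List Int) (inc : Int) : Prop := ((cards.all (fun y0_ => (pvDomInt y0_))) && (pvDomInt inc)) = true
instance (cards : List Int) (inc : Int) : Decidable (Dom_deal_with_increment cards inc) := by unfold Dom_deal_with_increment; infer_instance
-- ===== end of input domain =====

-- B is a different algorithm: instead of scattering card i to slot (i*inc) % l with a running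
-- index, it computes the modular inverse of inc mod l by extended Euclid and GATHERS,
-- out[j] = cards[(j*inv) % l] (objective: alternative; return-value equivalence on coprime inputs).

-- ===== PORT A =====
-- The Python builds d = [None]*l and fills slots; under Pre_ every slot is filled, so the
-- final `.map (·.getD 0)` only realises the Option-free return type List Int.
-- `index` stays ≥ 0 (Python `%` with positive l), so `.toNat` on it is exact.
def deal_with_increment (cards : List Int) (inc : Int) : List Int :=
  let l : Int := (cards.length : Int)
  let loop :=
    cards.foldl
      (fun (st : List (Option Int) × Int) (c : Int) =>
        (st.1.set st.2.toNat (some c), PySem.Int.mod (st.2 + inc) l))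
      (List.replicate cards.length (none : Option Int), 0)
  loop.1.map (fun o => o.getD 0)

-- ===== PORT B =====
-- needed by the port's decreasing_by: the Euclid remainder shrinks in absolute value
theorem pv_mod_natAbs_lt (a r : Int) (h : r ≠ 0) :
    (a - PySem.Int.floordiv a r * r).natAbs < r.natAbs := by
  have hm : a - PySem.Int.floordiv a r * r = PySem.Int.mod a r := by
    have := PySem.Int.floordiv_mul_add_mod a r; omega
  rw [hm]
  rcases lt_or_gt_of_ne h with hneg | hpos
  · have := PySem.Int.mod_neg_bounds a hneg; omega
  · have h1 := PySem.Int.mod_nonneg a hpos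
    have h2 := PySem.Int.mod_lt a hpos
    omega

-- Source B's _modinv while-loop, step for step (old_r,r,old_s,s threaded; returns old_s % m)
def pvEgcdLoop (old_r r old_s s m : Int) : Int :=
  if h : r = 0 then PySem.Int.mod old_s m
  else
    pvEgcdLoop r (old_r - PySem.Int.floordiv old_r r * r)
      s (old_s - PySem.Int.floordiv old_r r * s) m
termination_by r.natAbs
decreasing_by exact pv_mod_natAbs_lt old_r r h

def deal_with_increment_alt (cards : List Int) (inc : Int) : List Int :=
  let l : Int := (cards.length : Int)
  if l = 0 then []
  else
    let inv := pvEgcdLoop (PySem.Int.mod inc l) l 1 0 l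
    (PySem.List.pyRange 0 l 1).map
      (fun j => PySem.List.pyGetD cards (PySem.Int.mod (j * inv) l) 0)

-- ===== PRECONDITION & SPEC =====
-- Pre_ excludes inputs where inc is not coprime with len(cards): there A returns a list that
-- still contains None, which is not a value of the declared type list[int].
def Pre_deal_with_increment (cards : List Int) (inc : Int) : Prop :=
  cards = [] ∨ Int.gcd inc (cards.length : Int) = 1
instance (cards : List Int) (inc : Int) : Decidable (Pre_deal_with_increment cards inc) := by
  unfold Pre_deal_with_increment; infer_instance
def pvWitness_deal_with_increment : List Int × Int := ([1, 2, 3, 4, 5], 2)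
def Spec_deal_with_increment (cards : List Int) (inc : Int) (out : List Int) : Prop := out = deal_with_increment_alt cards inc
instance (cards : List Int) (inc : Int) (out : List Int) : Decidable (Spec_deal_with_increment cards inc out) := by unfold Spec_deal_with_increment; infer_instance

-- ===== CLAIM (what is proved, stated in full; the proofs are below) =====
def Claim_equal_deal_with_increment : Prop := ∀ (cards : List Int) (inc : Int), Dom_deal_with_increment cards inc → Pre_deal_with_increment cards inc → Spec_deal_with_increment cards inc (deal_with_increment cards inc)

-- ===== LEMMAS AND PROOFS =====

-- extended-Euclid invariant: the loop returns a value v ∈ [0, m) with v*a0 ≡ gcd(a0, m) (mod m)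
theorem pvEgcdLoop_spec (m a0 : Int) (hm : 0 < m)
    (r0 r1 s0 s1 : Int) (h0 : 0 ≤ r0) (h1 : 0 ≤ r1)
    (hg : Int.gcd r0 r1 = Int.gcd a0 m)
    (e0 : r0 ≡ s0 * a0 [ZMOD m]) (e1 : r1 ≡ s1 * a0 [ZMOD m]) :
    0 ≤ pvEgcdLoop r0 r1 s0 s1 m ∧ pvEgcdLoop r0 r1 s0 s1 m < m ∧
      (Int.gcd a0 m : Int) ≡ pvEgcdLoop r0 r1 s0 s1 m * a0 [ZMOD m] := by
  unfold pvEgcdLoop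
  split_ifs with hz
  · subst hz
    refine ⟨PySem.Int.mod_nonneg s0 hm, PySem.Int.mod_lt s0 hm, ?_⟩
    have hr0 : (Int.gcd a0 m : Int) = r0 := by
      rw [← hg]; simp [Int.gcd]; omega
    have hmods : PySem.Int.mod s0 m ≡ s0 [ZMOD m] := by
      rw [PySem.Int.mod_eq_emod_of_pos hm]
      exact Int.emod_emod_of_dvd s0 dvd_rfl
    calc (Int.gcd a0 m : Int) = r0 := hr0
      _ ≡ s0 * a0 [ZMOD m] := e0
      _ ≡ PySem.Int.mod s0 m * a0 [ZMOD m] := (hmods.mul_right a0).symm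
  · have h1' : 0 < r1 := lt_of_le_of_ne h1 (Ne.symm hz)
    have hmodeq : r0 - PySem.Int.floordiv r0 r1 * r1 = r0 % r1 := by
      have := PySem.Int.floordiv_mul_add_mod r0 r1
      have := PySem.Int.mod_eq_emod_of_pos (a := r0) h1'
      omega
    rw [hmodeq]
    have hq : PySem.Int.floordiv r0 r1 = r0 / r1 := PySem.Int.floordiv_eq_ediv_of_pos h1'
    refine pvEgcdLoop_spec m a0 hm r1 (r0 % r1) s1 _ h1 (Int.emod_nonneg r0 hz) ?_ e1 ?_
    · rw [Int.gcd_comm, Int.gcd_emod, hg]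
    · have step : r0 % r1 = r0 - PySem.Int.floordiv r0 r1 * r1 := hmodeq.symm
      rw [step, hq]
      have : r0 - r0 / r1 * r1 ≡ s0 * a0 - r0 / r1 * (s1 * a0) [ZMOD m] :=
        e0.sub ((e1.mul_left (r0 / r1)))
      calc r0 - r0 / r1 * r1 ≡ s0 * a0 - r0 / r1 * (s1 * a0) [ZMOD m] := this
        _ = (s0 - r0 / r1 * s1) * a0 := by ring
termination_by r1.natAbs
decreasing_by
  have hlt := pv_mod_natAbs_lt r0 r1 hz
  rw [hmodeq] at hlt
  exact hlt

-- A's running-index loop equals a scatter over the enumeration with closed-form destinations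
theorem pv_loop_eq (inc l : Int) (hl : 0 < l) :
    ∀ (xs : List Int) (d : List (Option Int)) (k j : Int), j = PySem.Int.mod (k * inc) l →
      (xs.foldl
        (fun (st : List (Option Int) × Int) (c : Int) =>
          (st.1.set st.2.toNat (some c), PySem.Int.mod (st.2 + inc) l))
        (d, j)).1
      = (PySem.List.enumerate xs k).foldl
          (fun (d : List (Option Int)) (p : Int × Int) =>
            d.set (PySem.Int.mod (p.1 * inc) l).toNat (some p.2))
          d := by
  intro xs
  induction xs with
  | nil => intro d k j _; simp [PySem.List.enumerate_nil]
  | cons x xs ih =>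
      intro d k j hj
      subst hj
      rw [PySem.List.enumerate_cons]
      simp only [List.foldl_cons]
      have hmod : PySem.Int.mod (PySem.Int.mod (k * inc) l + inc) l
          = PySem.Int.mod ((k + 1) * inc) l := by
        rw [PySem.Int.mod_eq_emod_of_pos hl, PySem.Int.mod_eq_emod_of_pos hl,
            PySem.Int.mod_eq_emod_of_pos hl, Int.emod_add_emod]
        ring_nf
      rw [hmod]
      exact ih _ (k + 1) _ rfl

-- scatter folds: length is preserved
theorem pv_fold_len (dest : Int → Nat) :
    ∀ (ps : List (Int × Int)) (d : List (Option Int)),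
      (ps.foldl (fun d p => d.set (dest p.1) (some p.2)) d).length = d.length := by
  intro ps
  induction ps with
  | nil => intro d; rfl
  | cons q ps ih => intro d; simp only [List.foldl_cons]; rw [ih]; simp

-- scatter folds: a slot none of the destinations hits keeps its value
theorem pv_scatter_untouched (dest : Int → Nat) :
    ∀ (ps : List (Int × Int)) (d : List (Option Int)) (p : Nat),
      (∀ q ∈ ps, dest q.1 ≠ p) →
      (ps.foldl (fun d p => d.set (dest p.1) (some p.2)) d)[p]? = d[p]? := by
  intro ps
  induction ps with
  | nil => intro d p _; rfl
  | cons q ps ih =>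
      intro d p h
      simp only [List.foldl_cons]
      rw [ih _ p (fun q' hq' => h q' (List.mem_cons_of_mem _ hq'))]
      exact List.getElem?_set_ne (h q List.mem_cons_self)

-- scatter folds over an enumeration with pairwise-distinct in-range destinations:
-- the slot of entry i holds exactly card i
theorem pv_scatter_hit (dest : Int → Nat) :
    ∀ (xs : List Int) (k : Int) (d : List (Option Int)) (i : Nat) (hi : i < xs.length),
      dest (k + (i : Int)) < d.length →
      (∀ i' : Nat, i' < xs.length → i' ≠ i → dest (k + (i' : Int)) ≠ dest (k + (i : Int))) →
      ((PySem.List.enumerate xs k).foldl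
          (fun d p => d.set (dest p.1) (some p.2)) d)[dest (k + (i : Int))]?
        = some (some xs[i]) := by
  intro xs
  induction xs with
  | nil => intro k d i hi; exact absurd hi (by simp)
  | cons x xs ih =>
      intro k d i hi hlen hinj
      rw [PySem.List.enumerate_cons, List.foldl_cons]
      cases i with
      | zero =>
          simp only [Nat.cast_zero, add_zero] at hlen hinj ⊢
          rw [pv_scatter_untouched dest _ _ _ ?_]
          · simp only [List.getElem_cons_zero]
            exact List.getElem?_set_self (by simpa using hlen)
          · intro q hq
            rw [PySem.List.mem_enumerate_iff] at hq
            obtain ⟨j, hj, rfl⟩ := hq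
            have hcast : k + 1 + (j : Int) = k + ((j + 1 : Nat) : Int) := by push_cast; ring
            simp only [hcast]
            exact hinj (j + 1) (by simpa using hj) (by omega)
      | succ i2 =>
          have hcast : k + ((i2 + 1 : Nat) : Int) = (k + 1) + (i2 : Int) := by push_cast; ring
          rw [hcast]
          have h1 : i2 < xs.length := by simpa using hi
          have := ih (k + 1) (d.set (dest k) (some x)) i2 h1
            (by rw [← hcast]; simpa using hlen)
            (fun i' hi' hne => by
              have hc1 : (k + 1) + (i' : Int) = k + ((i' + 1 : Nat) : Int) := by push_cast; ring
              rw [hc1, ← hcast]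
              exact hinj (i' + 1) (by simpa using hi') (by omega))
          simpa using this

-- ===== VERDICT (by name: the statement is the Claim_ definition above) =====
theorem deal_with_increment_spec : Claim_equal_deal_with_increment := by
  intro cards inc _hdom hpre
  unfold Spec_deal_with_increment
  rcases eq_or_ne cards [] with hnil | hnil
  · subst hnil; rfl
  have hn : 0 < cards.length := List.length_pos_of_ne_nil hnil
  set n := cards.length with hndef
  set l : Int := (n : Int) with hldef
  have hl : 0 < l := by rw [hldef]; omega
  have hg : Int.gcd inc l = 1 := hpre.resolve_left hnil
  set a0 := PySem.Int.mod inc l with ha0def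
  have ha0e : a0 = inc % l := PySem.Int.mod_eq_emod_of_pos (a := inc) hl
  have hga : Int.gcd a0 l = 1 := by rw [ha0e, Int.gcd_emod]; exact hg
  set inv := pvEgcdLoop a0 l 1 0 l with hinvdef
  obtain ⟨hinv0, hinvl, hc⟩ :=
    pvEgcdLoop_spec l a0 hl a0 l 1 0
      (PySem.Int.mod_nonneg inc hl) (le_of_lt hl) rfl
      (by rw [one_mul])
      (by show l % l = (0 * a0) % l; simp)
  have hone : (1 : Int) ≡ inv * a0 [ZMOD l] := by
    rw [hga] at hc; exact_mod_cast hc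
  have ha0m : a0 ≡ inc [ZMOD l] := by
    show a0 % l = inc % l
    rw [ha0e]; exact Int.emod_emod_of_dvd inc dvd_rfl
  have hinc : (1 : Int) ≡ inv * inc [ZMOD l] := hone.trans (ha0m.mul_left inv)
  -- key inverse identity
  have key : ∀ j : Int, 0 ≤ j → j < l →
      PySem.Int.mod (PySem.Int.mod (j * inv) l * inc) l = j := by
    intro j hj0 hjl
    rw [PySem.Int.mod_eq_emod_of_pos hl, PySem.Int.mod_eq_emod_of_pos hl]
    have hself : (j * inv) % l ≡ j * inv [ZMOD l] := Int.emod_emod_of_dvd _ dvd_rfl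
    have h1 : (j * inv % l) * inc ≡ j * (inv * inc) [ZMOD l] := by
      calc (j * inv % l) * inc ≡ (j * inv) * inc [ZMOD l] := hself.mul_right inc
        _ = j * (inv * inc) := by ring
    have h2 : j * (inv * inc) ≡ j * 1 [ZMOD l] := hinc.symm.mul_left j
    have h3 : (j * inv % l) * inc ≡ j [ZMOD l] := by
      simpa using h1.trans h2
    calc (j * inv % l) * inc % l = j % l := h3
      _ = j := Int.emod_eq_of_lt hj0 hjl
  -- destinations of A's scatter
  set dest : Int → Nat := fun i => (PySem.Int.mod (i * inc) l).toNat with hdest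
  have hdlt : ∀ i : Int, dest i < n := by
    intro i
    have h1 := PySem.Int.mod_lt (i * inc) hl
    have h2 := PySem.Int.mod_nonneg (i * inc) hl
    simp only [hdest]; omega
  have hinj : ∀ i i' : Int, 0 ≤ i → i < l → 0 ≤ i' → i' < l →
      dest i = dest i' → i = i' := by
    intro i i' h0 h1 h0' h1' he
    have hm0 := PySem.Int.mod_nonneg (i * inc) hl
    have hm0' := PySem.Int.mod_nonneg (i' * inc) hl
    have hmm : PySem.Int.mod (i * inc) l = PySem.Int.mod (i' * inc) l := by
      simp only [hdest] at he; omega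
    rw [PySem.Int.mod_eq_emod_of_pos hl, PySem.Int.mod_eq_emod_of_pos hl] at hmm
    have hmodeq : i * inc ≡ i' * inc [ZMOD l] := hmm
    have : i ≡ i' [ZMOD l] := by
      calc i = i * 1 := by ring
        _ ≡ i * (inv * inc) [ZMOD l] := hinc.mul_left i
        _ = (i * inc) * inv := by ring
        _ ≡ (i' * inc) * inv [ZMOD l] := hmodeq.mul_right inv
        _ = i' * (inv * inc) := by ring
        _ ≡ i' * 1 [ZMOD l] := hinc.symm.mul_left i'
        _ = i' := by ring
    have hee : i % l = i' % l := this
    rw [Int.emod_eq_of_lt h0 h1, Int.emod_eq_of_lt h0' h1'] at hee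
    exact hee
  -- rewrite both sides
  have hA : deal_with_increment cards inc
      = ((PySem.List.enumerate cards 0).foldl
          (fun d p => d.set (dest p.1) (some p.2))
          (List.replicate n (none : Option Int))).map (fun o => o.getD 0) := by
    unfold deal_with_increment
    dsimp only
    rw [pv_loop_eq inc l hl cards _ 0 0
        (by rw [PySem.Int.mod_eq_emod_of_pos hl]; simp)]
  have hB : deal_with_increment_alt cards inc
      = (PySem.List.pyRange 0 l 1).map
          (fun j => PySem.List.pyGetD cards (PySem.Int.mod (j * inv) l) 0) := by
    unfold deal_with_increment_alt
    dsimp only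
    rw [if_neg (by omega)]
  rw [hA, hB]
  have hAlen : (((PySem.List.enumerate cards 0).foldl
      (fun d p => d.set (dest p.1) (some p.2))
      (List.replicate n (none : Option Int))).map (fun o => o.getD 0)).length = n := by
    rw [List.length_map, pv_fold_len, List.length_replicate]
  apply List.ext_getElem
  · rw [hAlen, List.length_map, PySem.List.length_pyRange_one]; omega
  intro j hj1 hj2
  have hjn : j < n := by rw [hAlen] at hj1; exact hj1
  have hj0l : (0 : Int) ≤ (j : Int) ∧ (j : Int) < l := by
    rw [hldef]; omega
  -- the source index for slot j
  set gj : Nat := (PySem.Int.mod ((j : Int) * inv) l).toNat with hgj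
  have hg0 := PySem.Int.mod_nonneg ((j : Int) * inv) hl
  have hgl := PySem.Int.mod_lt ((j : Int) * inv) hl
  have hgjn : gj < n := by simp only [hgj]; omega
  have hgcast : ((gj : Nat) : Int) = PySem.Int.mod ((j : Int) * inv) l := by
    simp only [hgj]; omega
  have hdestgj : dest (0 + (gj : Int)) = j := by
    simp only [zero_add, hgcast, hdest]
    rw [key (j : Int) hj0l.1 hj0l.2]
    omega
  -- B's element at j
  have hBel : ((PySem.List.pyRange 0 l 1).map
      (fun j => PySem.List.pyGetD cards (PySem.Int.mod (j * inv) l) 0))[j]'hj2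
      = cards[gj]'(hgjn) := by
    rw [List.getElem_map, PySem.List.getElem_pyRange_one]
    simp only [zero_add]
    rw [PySem.List.pyGetD_eq_getElem cards 0 hg0 (by omega)]
  rw [hBel]
  -- A's element at j via the scatter lemma
  have hhit := pv_scatter_hit dest cards 0 (List.replicate n (none : Option Int)) gj hgjn
    (by rw [List.length_replicate, hdestgj]; exact hjn)
    (fun i' hi' hne => by
      intro habs
      have h0le : (0 : Int) ≤ (i' : Int) := Int.natCast_nonneg i'
      have hlt : ((i' : Nat) : Int) < l := by omega
      have h0le2 : (0 : Int) ≤ (gj : Int) := Int.natCast_nonneg gj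
      have hlt2 : ((gj : Nat) : Int) < l := by omega
      have := hinj _ _ h0le hlt h0le2 hlt2 (by simpa using habs)
      exact hne (by exact_mod_cast this))
  rw [hdestgj] at hhit
  have hjf : j < ((PySem.List.enumerate cards 0).foldl
      (fun d p => d.set (dest p.1) (some p.2))
      (List.replicate n (none : Option Int))).length := by
    rw [pv_fold_len, List.length_replicate]; exact hjn
  rw [List.getElem?_eq_getElem hjf] at hhit
  rw [List.getElem_map]
  have := Option.some.inj hhit
  rw [this]
  rfl
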